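-- pv_equiv track=rewrite | github.com/FaithAdline/favy-challenge | lib/time.py | calculate_consonant_value
-- ===== SOURCE A (Python) =====
-- def calculate_consonant_value(word):
--     consonant_values = {'a': 1, 'b': 2, 'c': 3, 'd': 4, 'e': 5,
--                         'f': 6, 'g': 7, 'h': 8, 'i': 9, 'j': 10,
--                         'k': 11, 'l': 12, 'm': 13, 'n': 14, 'o': 15,
--                         'p': 16, 'q': 17, 'r': 18, 's': 19, 't': 20,
--                         'u': 21, 'v': 22, 'w': 23, 'x': 24, 'y': 25, 'z': 26}
--
--     substrings = [consonant_values[char] for char in word if char in consonant_values]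
--     return max(substrings, default=0)
-- ===== SOURCE B (Python) =====
-- def calculate_consonant_value(word):
--     # Different strategy: instead of scanning the word, walk the alphabet from
--     # 'z' down to 'a' and return the position of the first letter that occurs
--     # in the word (early exit); 0 if no letter occurs.
--     for v in range(26, 0, -1):
--         if chr(96 + v) in word:
--             return v
--     return 0
-- ===== Notes on version B (the rewrite author's own statement) =====
-- stated objective: alternative
-- what changed: Instead of mapping every character of the word through a dict and taking max over the resulting list, B iterates over the alphabet from 'z' down to 'a' and returns the position of the first letter found in the word (membership test per letter, early exit), 0 if none occurs.
import Mathlib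
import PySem

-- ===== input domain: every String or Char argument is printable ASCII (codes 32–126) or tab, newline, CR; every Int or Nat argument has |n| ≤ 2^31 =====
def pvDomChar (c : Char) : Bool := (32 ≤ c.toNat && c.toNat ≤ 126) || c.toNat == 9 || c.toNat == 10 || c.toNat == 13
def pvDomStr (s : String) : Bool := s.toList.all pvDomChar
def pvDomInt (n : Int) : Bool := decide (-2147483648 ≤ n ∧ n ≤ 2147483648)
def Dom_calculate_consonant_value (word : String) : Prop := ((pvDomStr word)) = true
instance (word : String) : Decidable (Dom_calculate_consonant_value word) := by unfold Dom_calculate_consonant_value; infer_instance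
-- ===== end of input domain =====

-- B replaces A's per-character dict lookup + max over an intermediate list by a scan of the
-- alphabet from 'z' down to 'a', returning the first letter found in the word (alternative strategy).


-- ===== PORT A =====
-- the dict literal 'consonant_values' of A
def cvDict : PySem.Dict Char Int := PySem.Dict.ofList
  [('a',1),('b',2),('c',3),('d',4),('e',5),('f',6),('g',7),('h',8),('i',9),('j',10),
   ('k',11),('l',12),('m',13),('n',14),('o',15),('p',16),('q',17),('r',18),('s',19),('t',20),
   ('u',21),('v',22),('w',23),('x',24),('y',25),('z',26)]

def calculate_consonant_value (word : String) : Int :=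
  let substrings := (word.toList.filter
      (fun char => (cvDict.get? char).isSome)).map
      (fun char => (cvDict.get? char).getD 0)   -- getD 0 never fires: the filter guarantees the key is present
  PySem.List.maxD substrings (fun x => x) 0     -- max(substrings, default=0)

-- ===== PORT B =====
-- the loop 'for v in range(26, 0, -1): if chr(96 + v) in word: return v' with early return;
-- 'chr(96 + v) in word' is Python's substring test, ported exactly as PySem.Str.isIn
def cvScan (w : String) : List Int → Int
  | [] => 0                                     -- fell through the loop: return 0
  | v :: rest =>
      if PySem.Str.isIn (String.ofList [Char.ofNat (96 + v).toNat]) w then v else cvScan w rest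

def calculate_consonant_value_alt (word : String) : Int :=
  cvScan word (PySem.List.pyRange 26 0 (-1))

-- ===== PRECONDITION & SPEC =====
def Spec_calculate_consonant_value (word : String) (out : Int) : Prop := out = calculate_consonant_value_alt word
instance (word : String) (out : Int) : Decidable (Spec_calculate_consonant_value word out) := by unfold Spec_calculate_consonant_value; infer_instance

-- ===== CLAIM (what is proved, stated in full; the proofs are below) =====
def Claim_equal_calculate_consonant_value : Prop := ∀ (word : String), Dom_calculate_consonant_value word → Spec_calculate_consonant_value word (calculate_consonant_value word)

-- ===== LEMMAS AND PROOFS =====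

lemma char_le_iff (a b : Char) : a ≤ b ↔ a.toNat ≤ b.toNat := by
  rw [Char.le_def, UInt32.le_iff_toNat_le]; rfl

-- characterisation of A's dict: lookup succeeds exactly on 'a'..'z', with value ord(c) - 96
lemma cv_get (c : Char) :
    cvDict.get? c = if 'a' ≤ c ∧ c ≤ 'z' then some ((c.toNat : Int) - 96) else none := by
  rw [show cvDict = PySem.Dict.mk
    [('a',1),('b',2),('c',3),('d',4),('e',5),('f',6),('g',7),('h',8),('i',9),('j',10),
     ('k',11),('l',12),('m',13),('n',14),('o',15),('p',16),('q',17),('r',18),('s',19),('t',20),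
     ('u',21),('v',22),('w',23),('x',24),('y',25),('z',26)] from by decide]
  by_cases hlz : 97 ≤ c.toNat ∧ c.toNat ≤ 122
  · rw [if_pos (by rw [char_le_iff, char_le_iff]; exact ⟨hlz.1, hlz.2⟩)]
    obtain ⟨h1, h2⟩ := hlz
    rw [← Char.ofNat_toNat c]
    generalize c.toNat = n at h1 h2 ⊢
    interval_cases n <;> decide
  · rw [if_neg (by rw [char_le_iff, char_le_iff]; exact fun h => hlz ⟨h.1, h.2⟩)]
    have hne : ∀ d : Char, 97 ≤ d.toNat → d.toNat ≤ 122 → (d == c) = false := by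
      intro d hd1 hd2
      rw [beq_eq_false_iff_ne]
      rintro rfl
      exact hlz ⟨hd1, hd2⟩
    simp only [PySem.Dict.get?_mk_cons,
      hne 'a' (by decide) (by decide), hne 'b' (by decide) (by decide),
      hne 'c' (by decide) (by decide), hne 'd' (by decide) (by decide),
      hne 'e' (by decide) (by decide), hne 'f' (by decide) (by decide),
      hne 'g' (by decide) (by decide), hne 'h' (by decide) (by decide),
      hne 'i' (by decide) (by decide), hne 'j' (by decide) (by decide),
      hne 'k' (by decide) (by decide), hne 'l' (by decide) (by decide),
      hne 'm' (by decide) (by decide), hne 'n' (by decide) (by decide),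
      hne 'o' (by decide) (by decide), hne 'p' (by decide) (by decide),
      hne 'q' (by decide) (by decide), hne 'r' (by decide) (by decide),
      hne 's' (by decide) (by decide), hne 't' (by decide) (by decide),
      hne 'u' (by decide) (by decide), hne 'v' (by decide) (by decide),
      hne 'w' (by decide) (by decide), hne 'x' (by decide) (by decide),
      hne 'y' (by decide) (by decide), hne 'z' (by decide) (by decide),
      Bool.false_eq_true, if_false]
    rfl

-- proof-side running-max step (NOT part of either port: proof intermediary)
def bStep : Int → Char → Int :=
  fun best c =>
    if 'a' ≤ c ∧ c ≤ 'z' then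
      max best ((c.toNat : Int) - 96)
    else best

lemma B_acc (l : List Char) : ∀ (a : Int),
    l.foldl bStep a
      = ((l.filter (fun c => decide ('a' ≤ c ∧ c ≤ 'z'))).map
          (fun c => (c.toNat : Int) - 96)).foldl max a := by
  induction l with
  | nil => intro a; rfl
  | cons c t ih =>
    intro a
    simp only [List.filter_cons, List.foldl_cons]
    by_cases h : 'a' ≤ c ∧ c ≤ 'z'
    · rw [if_pos (decide_eq_true_iff.mpr h)]
      simp only [List.map_cons, List.foldl_cons]
      rw [ih, show bStep a c = max a ((c.toNat : Int) - 96) from by rw [bStep, if_pos h]]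
    · rw [if_neg (by simp [h]), ih, show bStep a c = a from by simp [bStep, h]]

lemma mem_ge_one (l : List Char) :
    ∀ y ∈ (l.filter (fun c => decide ('a' ≤ c ∧ c ≤ 'z'))).map
        (fun c => (c.toNat : Int) - 96), 1 ≤ y := by
  intro y hy
  obtain ⟨c, hc, hfc⟩ := List.mem_map.mp hy
  have h := decide_eq_true_iff.mp (List.mem_filter.mp hc).2
  have := (char_le_iff 'a' c).mp h.1
  simp only [show ('a').toNat = 97 from rfl] at this
  omega

lemma filter_map_eq (l : List Char) :
    (l.filter (fun char => (cvDict.get? char).isSome)).map (fun char => (cvDict.get? char).getD 0)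
      = (l.filter (fun c => decide ('a' ≤ c ∧ c ≤ 'z'))).map (fun c => (c.toNat : Int) - 96) := by
  induction l with
  | nil => rfl
  | cons c t ih =>
    simp only [List.filter_cons, cv_get c]
    by_cases h : 'a' ≤ c ∧ c ≤ 'z'
    · simp [h, ih, cv_get c]
    · simp [h, ih]

lemma maxD_pos (ys : List Int) (h : ∀ y ∈ ys, 1 ≤ y) :
    PySem.List.maxD ys (fun x => x) 0 = ys.foldl max 0 := by
  cases ys with
  | nil => rfl
  | cons x t =>
    have hx : max 0 x = x := max_eq_right (by have := h x (by simp); omega)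
    rw [PySem.List.maxD, PySem.List.max?_id_cons, Option.getD_some, List.foldl_cons, hx]

-- A equals the running maximum over the word
lemma A_eq_fold (word : String) :
    calculate_consonant_value word = word.toList.foldl bStep 0 := by
  show PySem.List.maxD _ (fun x => x) 0 = _
  rw [filter_map_eq, maxD_pos _ (mem_ge_one word.toList), B_acc]

-- properties of the running maximum
lemma fold_props (l : List Char) : ∀ (a : Int),
    a ≤ l.foldl bStep a ∧
    (l.foldl bStep a = a ∨
      ∃ c ∈ l, ('a' ≤ c ∧ c ≤ 'z') ∧ (c.toNat : Int) - 96 = l.foldl bStep a) ∧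
    (∀ c ∈ l, ('a' ≤ c ∧ c ≤ 'z') → (c.toNat : Int) - 96 ≤ l.foldl bStep a) := by
  induction l with
  | nil => intro a; exact ⟨le_refl a, Or.inl rfl, by simp⟩
  | cons c t ih =>
    intro a
    simp only [List.foldl_cons]
    obtain ⟨h1, h2, h3⟩ := ih (bStep a c)
    refine ⟨le_trans ?_ h1, ?_, ?_⟩
    · rw [bStep]; split_ifs <;> omega
    · rcases h2 with h2 | ⟨d, hd, hlet, hval⟩
      · by_cases h : 'a' ≤ c ∧ c ≤ 'z'
        · by_cases hc : a ≤ (c.toNat : Int) - 96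
          · refine Or.inr ⟨c, List.mem_cons_self, h, ?_⟩
            rw [h2, bStep, if_pos h]; omega
          · refine Or.inl ?_
            rw [h2, bStep, if_pos h]; omega
        · rw [h2, show bStep a c = a from by simp [bStep, h]]; exact Or.inl rfl
      · exact Or.inr ⟨d, List.mem_cons_of_mem _ hd, hlet, hval⟩
    · intro d hd hletd
      rcases List.mem_cons.mp hd with rfl | hd
      · exact le_trans (by rw [bStep, if_pos hletd]; omega) h1
      · exact h3 d hd hletd

-- the single-character substring test is character membership
lemma isIn_single (ch : Char) (w : String) :
    PySem.Str.isIn (String.ofList [ch]) w = true ↔ ch ∈ w.toList := by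
  rw [PySem.Str.isIn_iff_infix, String.toList_ofList]
  exact List.singleton_infix_iff ch w.toList

lemma cvScan_cons (w : String) (v : Int) (rest : List Int) :
    cvScan w (v :: rest)
      = if PySem.Str.isIn (String.ofList [Char.ofNat (96 + v).toNat]) w then v
        else cvScan w rest := rfl

-- descending list n, n-1, …, 1 (proof intermediary for pyRange 26 0 (-1))
def genDesc : Nat → List Int
  | 0 => []
  | n + 1 => ((n + 1 : Nat) : Int) :: genDesc n

lemma scan_genDesc (word : String) (m : Int) :
    ∀ n : Nat, n ≤ 26 → 0 ≤ m → m ≤ n →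
    (0 < m → ∃ c ∈ word.toList, ('a' ≤ c ∧ c ≤ 'z') ∧ (c.toNat : Int) - 96 = m) →
    (∀ c ∈ word.toList, ('a' ≤ c ∧ c ≤ 'z') → (c.toNat : Int) - 96 ≤ m) →
    cvScan word (genDesc n) = m := by
  intro n
  induction n with
  | zero => intro _ h0 hn _ _; simp [genDesc, cvScan]; omega
  | succ n ih =>
    intro hle h0 hn hex hub
    have hnat : (96 + ((n + 1 : Nat) : Int)).toNat = 97 + n := by omega
    have hch : (Char.ofNat (96 + ((n + 1 : Nat) : Int)).toNat).toNat = 97 + n := by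
      rw [hnat, Char.toNat_ofNat, if_pos (Or.inl (by omega))]
    rw [genDesc, cvScan_cons]
    by_cases hb : PySem.Str.isIn
        (String.ofList [Char.ofNat (96 + ((n + 1 : Nat) : Int)).toNat]) word = true
    · rw [if_pos hb]
      have hmem := (isIn_single _ _).mp hb
      have hletter : 'a' ≤ Char.ofNat (96 + ((n + 1 : Nat) : Int)).toNat ∧
          Char.ofNat (96 + ((n + 1 : Nat) : Int)).toNat ≤ 'z' := by
        rw [char_le_iff, char_le_iff, hch, show ('a').toNat = 97 from rfl,
          show ('z').toNat = 122 from rfl]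
        omega
      have hv := hub _ hmem hletter
      rw [hch] at hv
      push_cast at hv ⊢
      omega
    · rw [if_neg hb]
      have hmem : Char.ofNat (96 + ((n + 1 : Nat) : Int)).toNat ∉ word.toList :=
        fun h => hb ((isIn_single _ _).mpr h)
      have hm_ne : m ≠ ((n + 1 : Nat) : Int) := by
        intro heq
        obtain ⟨c, hc, hletc, hvalc⟩ := hex (by omega)
        have hcn : c.toNat = 97 + n := by omega
        have : c = Char.ofNat (96 + ((n + 1 : Nat) : Int)).toNat :=
          Char.ext (UInt32.toNat_inj.mp (by
            rw [show (Char.ofNat (96 + ((n + 1 : Nat) : Int)).toNat).val.toNat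
                = (Char.ofNat (96 + ((n + 1 : Nat) : Int)).toNat).toNat from rfl, hch]
            exact hcn))
        exact hmem (this ▸ hc)
      exact ih (by omega) h0 (by omega) hex hub

lemma pyRange_eq_genDesc : PySem.List.pyRange 26 0 (-1) = genDesc 26 := by decide

-- ===== VERDICT (by name: the statement is the Claim_ definition above) =====
theorem calculate_consonant_value_spec : Claim_equal_calculate_consonant_value := by
  intro word _
  show calculate_consonant_value word = calculate_consonant_value_alt word
  rw [A_eq_fold, calculate_consonant_value_alt, pyRange_eq_genDesc]
  obtain ⟨h1, h2, h3⟩ := fold_props word.toList 0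
  refine (scan_genDesc word _ 26 (le_refl _) h1 ?_ ?_ h3).symm
  · rcases h2 with h2 | ⟨c, hc, hletc, hvalc⟩
    · omega
    · have h97 := (char_le_iff 'a' c).mp hletc.1
      have h122 := (char_le_iff c 'z').mp hletc.2
      simp only [show ('a').toNat = 97 from rfl] at h97
      simp only [show ('z').toNat = 122 from rfl] at h122
      omega
  · intro _
    rcases h2 with h2 | h2
    · omega
    · exact h2
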